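-- pv_equiv track=rewrite | github.com/dms-vep/CHIKV-181-25-E-DMS | nextstrain/workflow/scripts/align-codons.py | codon_alignment
-- ===== SOURCE A (Python) =====
-- def codon_alignment(alignment, sequences):
--     """
--     Create a codon alignment based on protein alignment.
--     Use the untranslated sequences to get the codons.
--
--     Parameters
--     ----------
--     alignment: str
--         Path to an alignment file of the protein sequences
--     sequences: str
--         Path to a fasta file of the untranslated sequences
--
--     Returns
--     -------
--     list
--         A list of aligned codon seq records
--     """
--     codons = []
--     for accession, translation in alignment.items():
--         sequence = sequences[accession]
--         codon_sequence = ""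
--         codon_index = 0
--         for amino_acid in translation:
--             if amino_acid == "-":
--                 codon_sequence += "---"
--             else:
--                 codon_sequence += sequence[codon_index:codon_index + 3]
--                 codon_index += 3
--         codons.append(codon_sequence)
--     return codons
-- ===== SOURCE B (Python) =====
-- def codon_alignment(alignment, sequences):
--     """Gap-split variant: split the translation on '-', slice one whole codon block
--     per gap-free segment, and join the blocks with '---' (one separator per gap)."""
--     out = []
--     for accession, translation in alignment.items():
--         seq = sequences[accession]
--         pieces = []
--         taken = 0
--         for segment in translation.split('-'):
--             pieces.append(seq[3 * taken: 3 * (taken + len(segment))])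
--             taken += len(segment)
--         out.append('---'.join(pieces))
--     return out
-- ===== Notes on version B (the rewrite author's own statement) =====
-- stated objective: alternative
-- what changed: B splits each translation on '-' into gap-free segments, takes one whole block slice of 3*len(segment) codon characters per segment, and joins the blocks with '---' (one separator per gap), replacing A's per-amino-acid scan with its gap branch and codon_index advanced 3 at a time.
import Mathlib
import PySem

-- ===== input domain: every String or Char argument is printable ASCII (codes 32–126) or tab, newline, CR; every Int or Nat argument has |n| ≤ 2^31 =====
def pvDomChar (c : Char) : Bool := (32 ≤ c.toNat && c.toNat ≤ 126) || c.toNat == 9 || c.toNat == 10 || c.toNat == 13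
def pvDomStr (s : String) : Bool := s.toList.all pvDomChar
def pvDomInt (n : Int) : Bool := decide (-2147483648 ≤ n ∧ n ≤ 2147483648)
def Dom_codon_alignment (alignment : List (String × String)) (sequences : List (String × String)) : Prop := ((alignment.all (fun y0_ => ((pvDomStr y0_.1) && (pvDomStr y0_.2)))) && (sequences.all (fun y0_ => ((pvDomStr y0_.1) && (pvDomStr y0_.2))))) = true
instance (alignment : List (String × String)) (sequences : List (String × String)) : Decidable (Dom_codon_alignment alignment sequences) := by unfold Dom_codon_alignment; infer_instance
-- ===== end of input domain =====

-- B splits the translation on '-' into gap-free segments, slices one whole codon block per segment and joins with '---', instead of A's per-amino-acid scan with a gap branch and a codon index (alternative decomposition, same cost).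


-- ===== PORT A =====
-- one amino acid of A's inner loop: state = (codon_sequence, codon_index)
def pvAStep (sequence : List Char) (st : List Char × Int) (aa : Char) : List Char × Int :=
  if aa = '-' then (st.1 ++ ['-', '-', '-'], st.2)
  else (st.1 ++ PySem.List.slice sequence (some st.2) (some (st.2 + 3)), st.2 + 3)

def codon_alignment (alignment : List (String × String)) (sequences : List (String × String)) : List String :=
  alignment.foldl (fun codons kv =>
    let sequence := ((PySem.Dict.mk sequences).get? kv.1).getD ""   -- sequences[accession]; KeyError excluded by Pre_
    codons ++ [String.ofList (kv.2.toList.foldl (pvAStep sequence.toList) ([], 0)).1]) []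

-- ===== PORT B =====
-- one iteration of Source B's segment loop: state = (pieces, taken);
-- pieces.append(seq[3*taken : 3*(taken+len(segment))]); taken += len(segment)
def pvBSeg (seq : List Char) (st : List (List Char) × Int) (segment : List Char) : List (List Char) × Int :=
  (st.1 ++ [PySem.List.slice seq (some (3 * st.2)) (some (3 * (st.2 + segment.length)))],
   st.2 + segment.length)

def codon_alignment_alt (alignment : List (String × String)) (sequences : List (String × String)) : List String :=
  alignment.map (fun kv =>
    let seq := (((PySem.Dict.mk sequences).get? kv.1).getD "").toList
    let pieces := ((PySem.Chars.splitOn kv.2.toList ['-']).foldl (pvBSeg seq) ([], 0)).1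
    String.ofList (PySem.Chars.join ['-', '-', '-'] pieces))

-- ===== PRECONDITION & SPEC =====
-- Pre_ excludes association lists with duplicate keys (a Python dict cannot represent them, so any chosen
-- lookup/iteration value there is an artefact of the encoding) and alignment entries whose accession is
-- missing from sequences (Python raises KeyError there).
def Pre_codon_alignment (alignment : List (String × String)) (sequences : List (String × String)) : Prop :=
  (alignment.map Prod.fst).Nodup ∧ (sequences.map Prod.fst).Nodup ∧
  ∀ kv ∈ alignment, kv.1 ∈ sequences.map Prod.fst
instance (alignment : List (String × String)) (sequences : List (String × String)) : Decidable (Pre_codon_alignment alignment sequences) := by unfold Pre_codon_alignment; infer_instance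

def pvWitness_codon_alignment : (List (String × String)) × (List (String × String)) :=
  ([("a", "M-K"), ("b", "--M")], [("a", "ATGAAA"), ("b", "ATG")])

def Spec_codon_alignment (alignment : List (String × String)) (sequences : List (String × String)) (out : List String) : Prop := out = codon_alignment_alt alignment sequences
instance (alignment : List (String × String)) (sequences : List (String × String)) (out : List String) : Decidable (Spec_codon_alignment alignment sequences out) := by unfold Spec_codon_alignment; infer_instance

-- ===== CLAIM (what is proved, stated in full; the proofs are below) =====
def Claim_equal_codon_alignment : Prop := ∀ (alignment : List (String × String)) (sequences : List (String × String)), Dom_codon_alignment alignment sequences → Pre_codon_alignment alignment sequences → Spec_codon_alignment alignment sequences (codon_alignment alignment sequences)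

-- ===== LEMMAS AND PROOFS =====

-- Simple recursive characterisation of str.split('-') on char lists.
def pvSplitDash : List Char → List (List Char)
  | [] => [[]]
  | c :: rest =>
    if c = '-' then [] :: pvSplitDash rest
    else match pvSplitDash rest with
      | [] => [[c]]
      | h :: t => (c :: h) :: t

theorem pvSplitDash_ne_nil (l : List Char) : pvSplitDash l ≠ [] := by
  cases l with
  | nil => simp [pvSplitDash]
  | cons c rest =>
    simp only [pvSplitDash]
    split_ifs
    · simp
    · cases pvSplitDash rest <;> simp

def pvConsHead (p : List Char) : List (List Char) → List (List Char)
  | [] => [p]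
  | h :: t => (p ++ h) :: t

theorem pvSplitOn_go_eq (l : List Char) : ∀ (fuel : Nat) (cur : List Char) (acc : List (List Char)),
    l.length ≤ fuel →
    PySem.Chars.splitOn.go ['-'] fuel l cur acc = acc.reverse ++ pvConsHead cur.reverse (pvSplitDash l) := by
  induction l with
  | nil =>
    intro fuel cur acc _
    cases fuel <;> simp [PySem.Chars.splitOn.go, pvSplitDash, pvConsHead]
  | cons c rest ih =>
    intro fuel cur acc hf
    cases fuel with
    | zero => simp at hf
    | succ f =>
      by_cases hc : c = '-'
      · subst hc
        have hpre : List.isPrefixOf ['-'] ('-' :: rest) = true := by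
          simp [List.isPrefixOf]
        rw [PySem.Chars.splitOn.go]
        simp only [hpre, if_true]
        simp only [List.length_cons] at hf
        rw [show List.drop (List.length ['-']) ('-' :: rest) = rest by simp]
        rw [ih f [] (cur.reverse :: acc) (by omega)]
        cases hs : pvSplitDash rest with
        | nil => exact absurd hs (pvSplitDash_ne_nil rest)
        | cons h t =>
          simp [pvSplitDash, hs, pvConsHead]
      · have hpre : List.isPrefixOf ['-'] (c :: rest) = false := by
          simp [List.isPrefixOf]
          exact fun h => absurd h.symm hc
        rw [PySem.Chars.splitOn.go]
        simp only [hpre]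
        simp only [List.length_cons] at hf
        rw [if_neg (by simp)]
        rw [ih f (c :: cur) acc (by omega)]
        cases hs : pvSplitDash rest with
        | nil => exact absurd hs (pvSplitDash_ne_nil rest)
        | cons h t =>
          simp [pvSplitDash, hc, hs, pvConsHead]

theorem pvSplitOn_eq (l : List Char) : PySem.Chars.splitOn l ['-'] = pvSplitDash l := by
  rw [PySem.Chars.splitOn, pvSplitOn_go_eq l (l.length + 1) [] [] (by omega)]
  cases hs : pvSplitDash l with
  | nil => exact absurd hs (pvSplitDash_ne_nil l)
  | cons h t => simp [pvConsHead]

-- Common specification of one aligned row, per amino acid, with the count t of codons consumed.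
def pvSpec (seq : List Char) : List Char → Nat → List Char
  | [], _ => []
  | aa :: rest, t =>
    if aa = '-' then '-' :: '-' :: '-' :: pvSpec seq rest t
    else (seq.drop (3 * t)).take 3 ++ pvSpec seq rest (t + 1)

-- A's inner foldl computes pvSpec.
theorem pvA_eq_spec (seq : List Char) (tl : List Char) : ∀ (t : Nat) (acc : List Char),
    (tl.foldl (pvAStep seq) (acc, ((3 * t : Nat) : Int))).1 = acc ++ pvSpec seq tl t := by
  induction tl with
  | nil => intro t acc; simp [pvSpec]
  | cons aa rest ih =>
    intro t acc
    by_cases h : aa = '-'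
    · simp only [List.foldl_cons, pvAStep, h, pvSpec, reduceIte]
      rw [ih t (acc ++ ['-', '-', '-'])]
      simp
    · simp only [List.foldl_cons, pvAStep, pvSpec, if_neg h]
      have hslice : PySem.List.slice seq (some ((3 * t : Nat) : Int)) (some (((3 * t : Nat) : Int) + 3)) =
          (seq.drop (3 * t)).take 3 := by
        have := PySem.List.slice_natCast_add seq (j := 3 * t) (n := 3)
        simpa using this
      have hidx : ((3 * t : Nat) : Int) + 3 = ((3 * (t + 1) : Nat) : Int) := by push_cast; ring
      rw [hslice, hidx, ih (t + 1) _]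
      simp

-- B's pieces list, per segment.
def pvPieces (seq : List Char) : List (List Char) → Nat → List (List Char)
  | [], _ => []
  | s :: rest, t =>
    (seq.drop (3 * t)).take (3 * s.length) :: pvPieces seq rest (t + s.length)

theorem pvB_foldl (seq : List Char) (segs : List (List Char)) : ∀ (t : Nat) (acc : List (List Char)),
    (segs.foldl (pvBSeg seq) (acc, ((t : Nat) : Int))).1 = acc ++ pvPieces seq segs t := by
  induction segs with
  | nil => intro t acc; simp [pvPieces]
  | cons s rest ih =>
    intro t acc
    simp only [List.foldl_cons, pvBSeg, pvPieces]
    have h1 : (3 : Int) * ((t : Nat) : Int) = ((3 * t : Nat) : Int) := by push_cast; ring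
    have h2 : (3 : Int) * (((t : Nat) : Int) + (s.length : Int)) = (((3 * (t + s.length)) : Nat) : Int) := by
      push_cast; ring
    have h3 : ((t : Nat) : Int) + (s.length : Int) = ((t + s.length : Nat) : Int) := by push_cast; ring
    have hslice : PySem.List.slice seq (some ((3 * t : Nat) : Int)) (some ((3 * (t + s.length) : Nat) : Int)) =
        (seq.drop (3 * t)).take (3 * s.length) := by
      rw [PySem.List.slice_natCast]
      congr 1
      omega
    rw [h1, h2, h3, ih (t + s.length)]
    rw [hslice]
    simp

theorem pvPieces_ne_nil (seq : List Char) (s : List (List Char)) (t : Nat) (h : s ≠ []) :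
    pvPieces seq s t ≠ [] := by
  cases s with
  | nil => exact absurd rfl h
  | cons a b => simp [pvPieces]

-- joining with the head of the pieces list prefixed
theorem pvJoin_cons_append (sep p x : List Char) (l : List (List Char)) :
    PySem.Chars.join sep ((p ++ x) :: l) = p ++ PySem.Chars.join sep (x :: l) := by
  cases l with
  | nil => simp [PySem.Chars.join, List.intercalate]
  | cons y ys => simp [PySem.Chars.join, List.intercalate]

theorem pvJoin_eq_spec (seq : List Char) (tl : List Char) : ∀ (t : Nat),
    PySem.Chars.join ['-', '-', '-'] (pvPieces seq (pvSplitDash tl) t) = pvSpec seq tl t := by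
  induction tl with
  | nil =>
    intro t
    simp [pvSplitDash, pvPieces, pvSpec, PySem.Chars.join, List.intercalate]
  | cons c rest ih =>
    intro t
    by_cases hc : c = '-'
    · subst hc
      simp only [pvSplitDash, pvSpec, reduceIte]
      simp only [pvPieces, List.length_nil, Nat.mul_zero, List.take_zero, Nat.add_zero]
      cases hp : pvPieces seq (pvSplitDash rest) t with
      | nil => exact absurd hp (pvPieces_ne_nil seq _ t (pvSplitDash_ne_nil rest))
      | cons y ys =>
        have : PySem.Chars.join ['-', '-', '-'] ([] :: y :: ys) =
            '-' :: '-' :: '-' :: PySem.Chars.join ['-', '-', '-'] (y :: ys) := by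
          simp [PySem.Chars.join, List.intercalate]
        rw [this, ← hp, ih t]
    · simp only [pvSpec, if_neg hc]
      cases hs : pvSplitDash rest with
      | nil => exact absurd hs (pvSplitDash_ne_nil rest)
      | cons h tl' =>
        simp only [pvSplitDash, if_neg hc, hs]
        simp only [pvPieces, List.length_cons]
        have harith : t + (h.length + 1) = (t + 1) + h.length := by omega
        have htake : (seq.drop (3 * t)).take (3 * (h.length + 1)) =
            (seq.drop (3 * t)).take 3 ++ (seq.drop (3 * (t + 1))).take (3 * h.length) := by
          have h1 : 3 * (h.length + 1) = 3 + 3 * h.length := by ring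
          have h2 : (seq.drop (3 * t)).drop 3 = seq.drop (3 * (t + 1)) := by
            rw [List.drop_drop]; ring_nf
          rw [h1, List.take_add, h2]
        rw [harith, htake]
        rw [pvJoin_cons_append]
        rw [show pvPieces seq tl' (t + 1 + h.length) = pvPieces seq tl' ((t + 1) + h.length) from rfl]
        have := ih (t + 1)
        rw [hs] at this
        simp only [pvPieces] at this
        rw [this]

-- one row of A equals one row of B
theorem pvRow_eq (seq : List Char) (tl : List Char) :
    (tl.foldl (pvAStep seq) ([], 0)).1 =
      PySem.Chars.join ['-', '-', '-'] ((PySem.Chars.splitOn tl ['-']).foldl (pvBSeg seq) ([], 0)).1 := by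
  have hA := pvA_eq_spec seq tl 0 []
  simp only [Nat.mul_zero, Nat.cast_zero, List.nil_append] at hA
  have hB := pvB_foldl seq (PySem.Chars.splitOn tl ['-']) 0 []
  simp only [Nat.cast_zero, List.nil_append] at hB
  rw [hA, hB, pvSplitOn_eq, pvJoin_eq_spec]

-- ===== VERDICT (by name: the statement is the Claim_ definition above) =====
theorem codon_alignment_spec : Claim_equal_codon_alignment := by
  intro alignment sequences _ _
  unfold Spec_codon_alignment codon_alignment codon_alignment_alt
  rw [PySem.List.foldl_append_singleton_eq_map]
  apply List.map_congr_left
  intro kv _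
  exact congrArg String.ofList (pvRow_eq _ _)
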